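-- pv_equiv track=rewrite | github.com/qhjqhj00/MetaAgent | src/utils.py | truncate_reasoning_str
-- ===== SOURCE A (Python) =====
-- def truncate_reasoning_str(reasoning_str: str) -> str:
--     reasoning_str = reasoning_str.split("<think>")[-1]
--     truncated_reasoning_str = ""
--     reasoning_steps = reasoning_str.split("\n\n")
--     for i,step in enumerate(reasoning_steps):
--         if i == 0 or i >= len(reasoning_steps) - 5 or "<help>" in step or "<evidence>" in step:
--             truncated_reasoning_str += f"Step {i+1}: {step}\n\n"
--         else:
--             if truncated_reasoning_str[-len('\n\n...\n\n'):] != '\n\n...\n\n':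
--                 truncated_reasoning_str += '...\n\n'
--     return truncated_reasoning_str.strip('\n')
-- ===== SOURCE B (Python) =====
-- def truncate_reasoning_str(reasoning_str: str) -> str:
--     steps = reasoning_str.split("<think>")[-1].split("\n\n")
--     n = len(steps)
--     # Indices of the steps that survive truncation (index 0 is always among them).
--     kept = [i for i, s in enumerate(steps)
--             if i == 0 or i >= n - 5 or "<help>" in s or "<evidence>" in s]
--     # Walk consecutive pairs of kept indices; a gap > 1 means steps were dropped
--     # between them, which contributes exactly one "..." marker.
--     pieces = [f"Step {kept[0]+1}: {steps[kept[0]]}"]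
--     for prev, cur in zip(kept, kept[1:]):
--         if cur - prev > 1:
--             pieces.append("...")
--         pieces.append(f"Step {cur+1}: {steps[cur]}")
--     return "\n\n".join(pieces).strip("\n")
-- ===== Notes on version B (the rewrite author's own statement) =====
-- stated objective: alternative
-- what changed: A grows one output string step by step and re-inspects its 7-character suffix to decide whether to add another ellipsis; B never emits per dropped step at all: it first computes the list of kept indices, then walks consecutive pairs of kept indices and inserts a single '...' whenever their arithmetic gap exceeds 1, joining the pieces once at the end.
import Mathlib
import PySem

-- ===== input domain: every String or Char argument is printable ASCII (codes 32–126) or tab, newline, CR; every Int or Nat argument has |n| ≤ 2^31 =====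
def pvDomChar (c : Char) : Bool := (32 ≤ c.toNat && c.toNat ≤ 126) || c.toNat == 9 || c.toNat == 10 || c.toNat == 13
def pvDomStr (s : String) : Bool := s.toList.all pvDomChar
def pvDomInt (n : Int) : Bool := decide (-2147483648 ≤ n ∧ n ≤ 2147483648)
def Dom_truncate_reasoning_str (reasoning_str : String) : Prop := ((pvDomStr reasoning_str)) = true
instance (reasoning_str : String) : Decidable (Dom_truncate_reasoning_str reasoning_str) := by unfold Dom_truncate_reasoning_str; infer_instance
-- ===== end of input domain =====

-- B replaces A's grow-a-string-and-inspect-its-suffix loop by computing the kept indices and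
-- inserting one "..." per arithmetic gap between consecutive kept indices; objective: alternative.

-- ===== PORT A =====
-- shared rendering helpers (the f-string "Step {i+1}: {step}" and the keep condition)
def pvKeep (n : Int) (i : Int) (s : List Char) : Bool :=
  (i == 0) || decide (n - 5 ≤ i) || PySem.Chars.isIn "<help>".toList s
    || PySem.Chars.isIn "<evidence>".toList s

def pvStepPiece (i : Int) (s : List Char) : List Char :=
  "Step ".toList ++ PySem.Int.toChars (i + 1) ++ ": ".toList ++ s

-- A's loop body: append "Step …\n\n", or "...\n\n" unless the last 7 chars are already "\n\n...\n\n"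
def pvLoopA (n : Int) (acc : List Char) (p : Int × List Char) : List Char :=
  if pvKeep n p.1 p.2 then acc ++ (pvStepPiece p.1 p.2 ++ "\n\n".toList)
  else if PySem.Chars.slice acc (some (-7)) none ≠ "\n\n...\n\n".toList then
    acc ++ "...\n\n".toList
  else acc

def truncate_reasoning_str (reasoning_str : String) : String :=
  -- reasoning_str.split("<think>")[-1]; split's result is never empty, so pyGetD's default is unreachable
  let rs := PySem.List.pyGetD ((PySem.Chars.split? reasoning_str.toList "<think>".toList).getD []) (-1) []
  let steps := (PySem.Chars.split? rs "\n\n".toList).getD []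
  let acc := (PySem.List.enumerate steps).foldl (pvLoopA (steps.length : Int)) []
  String.ofList (PySem.Chars.stripChars acc "\n".toList)

-- ===== PORT B =====
-- B's pair loop: one "..." per gap > 1 between consecutive kept indices, then the rendered step
def pvGapLoop (steps : List (List Char)) (acc : List (List Char)) (pc : Int × Int) : List (List Char) :=
  (if pc.2 - pc.1 > 1 then acc ++ ["...".toList] else acc)
    ++ [pvStepPiece pc.2 ((PySem.List.pyGet? steps pc.2).getD [])]

def truncate_reasoning_str_alt (reasoning_str : String) : String :=
  let rs := PySem.List.pyGetD ((PySem.Chars.split? reasoning_str.toList "<think>".toList).getD []) (-1) []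
  let steps := (PySem.Chars.split? rs "\n\n".toList).getD []
  let n : Int := (steps.length : Int)
  let kept := ((PySem.List.enumerate steps).filter (fun p => pvKeep n p.1 p.2)).map Prod.fst
  -- kept[0]; kept is never empty since index 0 always satisfies the keep condition
  let first := (PySem.List.pyGet? kept 0).getD 0
  let pieces := (kept.zip (PySem.List.slice kept (some 1) none)).foldl (pvGapLoop steps)
      [pvStepPiece first ((PySem.List.pyGet? steps first).getD [])]
  String.ofList (PySem.Chars.stripChars (PySem.Chars.join "\n\n".toList pieces) "\n".toList)

-- ===== PRECONDITION & SPEC =====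
def Spec_truncate_reasoning_str (reasoning_str : String) (out : String) : Prop := out = truncate_reasoning_str_alt reasoning_str
instance (reasoning_str : String) (out : String) : Decidable (Spec_truncate_reasoning_str reasoning_str out) := by unfold Spec_truncate_reasoning_str; infer_instance

-- ===== CLAIM (what is proved, stated in full; the proofs are below) =====
def Claim_equal_truncate_reasoning_str : Prop := ∀ (reasoning_str : String), Dom_truncate_reasoning_str reasoning_str → Spec_truncate_reasoning_str reasoning_str (truncate_reasoning_str reasoning_str)

-- ===== LEMMAS AND PROOFS =====

-- equation lemmas for PySem.Chars.splitOn.go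
theorem pv_go_zero (sep l cur acc) : PySem.Chars.splitOn.go sep 0 l cur acc = ((cur.reverse ++ l) :: acc).reverse := by
  simp [PySem.Chars.splitOn.go]

theorem pv_go_succ_nil (sep fuel cur acc) : PySem.Chars.splitOn.go sep (fuel+1) [] cur acc = (cur.reverse :: acc).reverse := by
  simp [PySem.Chars.splitOn.go]

theorem pv_go_succ_cons (sep fuel c rest cur acc) : PySem.Chars.splitOn.go sep (fuel+1) (c :: rest) cur acc =
    if sep.isPrefixOf (c :: rest) then PySem.Chars.splitOn.go sep fuel (List.drop sep.length (c :: rest)) [] (cur.reverse :: acc)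
    else PySem.Chars.splitOn.go sep fuel rest (c :: cur) acc := by
  conv_lhs => rw [PySem.Chars.splitOn.go]

theorem pv_cur_no_sep (sep cur l : List Char) (hsep : sep ≠ [])
    (Hcur : ∀ j < cur.length, ¬ sep <+: (cur.reverse ++ l).drop j) : ¬ sep <:+: cur.reverse := by
  rintro hinf
  rw [List.infix_iff_prefix_suffix] at hinf
  obtain ⟨t, hpre, ⟨pre, hsuf⟩⟩ := hinf
  have ht : t ≠ [] := by
    rintro rfl; exact hsep (List.prefix_nil.mp hpre)
  have hlen : pre.length < cur.length := by
    have := congrArg List.length hsuf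
    simp at this
    rcases t with _ | _
    · exact absurd rfl ht
    · simp at this; omega
  apply Hcur pre.length hlen
  have : (cur.reverse ++ l).drop pre.length = t ++ l := by
    rw [← hsuf, List.append_assoc, List.drop_left]
  rw [this]
  exact hpre.trans (List.prefix_append t l)

-- every piece produced by splitOn.go is free of the separator (the scan cuts at every match)
theorem pv_go_pieces (sep : List Char) (hsep : sep ≠ []) :
    ∀ fuel (l cur : List Char) (acc : List (List Char)),
    l.length < fuel →
    (∀ j < cur.length, ¬ sep <+: (cur.reverse ++ l).drop j) →
    (∀ p ∈ acc, ¬ sep <:+: p) →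
    ∀ p ∈ PySem.Chars.splitOn.go sep fuel l cur acc, ¬ sep <:+: p := by
  intro fuel
  induction fuel with
  | zero => intro l cur acc h; omega
  | succ fuel ih =>
    intro l cur acc hfuel Hcur Hacc p hp
    match l with
    | [] =>
      rw [pv_go_succ_nil] at hp
      simp at hp
      rcases hp with h | rfl
      · exact Hacc p h
      · exact pv_cur_no_sep sep cur [] hsep Hcur
    | c :: rest =>
      rw [pv_go_succ_cons] at hp
      split at hp
      · refine ih _ _ _ (by have h1 : 1 ≤ sep.length := List.length_pos_iff.mpr hsep; simp at hfuel ⊢; omega) (by simp) ?_ p hp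
        intro q hq
        simp at hq
        rcases hq with rfl | hq
        · exact pv_cur_no_sep sep cur (c :: rest) hsep Hcur
        · exact Hacc q hq
      · rename_i hnp
        refine ih _ _ _ (by simp at hfuel ⊢; omega) ?_ Hacc p hp
        intro j hj
        simp at hj
        rcases Nat.lt_or_ge j cur.length with hlt | hge
        · have := Hcur j hlt
          simpa [List.append_assoc] using this
        · have hj' : j = cur.length := by omega
          subst hj'
          have : ((c :: cur).reverse ++ rest).drop cur.length = c :: rest := by
            have : (c :: cur).reverse ++ rest = cur.reverse ++ (c :: rest) := by simp
            rw [this, List.drop_append, List.drop_of_length_le (by simp), List.length_reverse]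
            simp
          rw [this]
          intro hpref
          exact hnp (List.isPrefixOf_iff_prefix.mpr hpref)

theorem pv_splitOn_pieces (s sep : List Char) (hsep : sep ≠ []) :
    ∀ p ∈ PySem.Chars.splitOn s sep, ¬ sep <:+: p := by
  intro p hp
  exact pv_go_pieces sep hsep (s.length + 1) s [] [] (by omega) (by simp) (by simp) p hp

theorem pv_go_ne_nil (sep : List Char) : ∀ fuel (l cur : List Char) (acc : List (List Char)),
    PySem.Chars.splitOn.go sep fuel l cur acc ≠ [] := by
  intro fuel
  induction fuel with
  | zero => intro l cur acc; rw [pv_go_zero]; simp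
  | succ fuel ih =>
    intro l cur acc
    match l with
    | [] => rw [pv_go_succ_nil]; simp
    | c :: rest => rw [pv_go_succ_cons]; split <;> apply ih

theorem pv_splitOn_ne_nil (s sep : List Char) : PySem.Chars.splitOn s sep ≠ [] := pv_go_ne_nil sep _ s [] []

-- A's accumulated string is the rendering of a piece list: each piece followed by "\n\n"
def pvRender (ps : List (List Char)) : List Char := (ps.map (· ++ "\n\n".toList)).flatten

theorem pv_render_append (ps : List (List Char)) (p : List Char) :
    pvRender (ps ++ [p]) = pvRender ps ++ (p ++ "\n\n".toList) := by
  simp [pvRender]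

theorem pv_drop_long_append (a c : List Char) (h : 7 ≤ c.length) :
    (a ++ c).drop ((a ++ c).length - 7) = c.drop (c.length - 7) := by
  have : (a ++ c).length - 7 = a.length + (c.length - 7) := by simp; omega
  rw [this, List.drop_append, List.drop_of_length_le (by omega)]
  simp

-- a rendered kept step never ends in "\n\n...\n\n" (its step text contains no "\n\n")
theorem pv_no_dots7 (i : Int) (s : List Char) (hs : ¬ (['\n','\n'] <:+: s)) :
    ¬ ("\n\n...\n\n".toList <:+ (pvStepPiece i s ++ "\n\n".toList)) := by
  intro h
  rw [← List.reverse_prefix] at h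
  have hrw : (pvStepPiece i s ++ "\n\n".toList).reverse
      = '\n' :: '\n' :: (s.reverse ++ ' ' :: ':' :: ((PySem.Int.toChars (i+1)).reverse ++ [' ','p','e','t','S'])) := by
    simp [pvStepPiece]
  rw [hrw] at h
  have h2 : ['.','.','.','\n','\n'] <+: s.reverse ++ ' ' :: ':' :: ((PySem.Int.toChars (i+1)).reverse ++ [' ','p','e','t','S']) := by
    have : ("\n\n...\n\n".toList).reverse = '\n' :: '\n' :: ['.','.','.','\n','\n'] := by decide
    rw [this] at h
    simpa [List.cons_prefix_cons] using h
  rcases hrev : s.reverse with _ | ⟨a, _ | ⟨b, _ | ⟨c, _ | ⟨d, _ | ⟨e, t⟩⟩⟩⟩⟩ <;> rw [hrev] at h2 <;>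
    simp [List.cons_prefix_cons] at h2
  obtain ⟨rfl, rfl, rfl, rfl, rfl, -⟩ := h2
  apply hs
  rw [← List.reverse_infix]
  rw [hrev]
  exact ⟨['.','.','.'], t, by simp⟩

theorem pv_slice_neg7 (acc : List Char) :
    PySem.List.slice acc (some (-7)) none = acc.drop (acc.length - 7) :=
  PySem.List.slice_from_neg_ofNat acc 7 (by omega)

theorem pv_chunk_len (i : Int) (s : List Char) : 7 ≤ (pvStepPiece i s ++ "\n\n".toList).length := by
  simp [pvStepPiece]
  omega

-- state invariant on A's string during the loop: ends in "\n\n...\n\n" iff the last step was dropped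
def pvInv (ps : List (List Char)) (b : Bool) : Prop :=
  ps ≠ [] ∧ (b = true → ∃ t, pvRender ps = t ++ "\n\n...\n\n".toList) ∧
    (b = false → (pvRender ps).drop ((pvRender ps).length - 7) ≠ "\n\n...\n\n".toList)

theorem pv_render_ends_nl2 (ps : List (List Char)) (h : ps ≠ []) :
    ∃ t, pvRender ps = t ++ "\n\n".toList := by
  rcases (List.eq_nil_or_concat ps) with rfl | ⟨q, p, rfl⟩
  · exact absurd rfl h
  refine ⟨pvRender q ++ p, ?_⟩
  rw [List.concat_eq_append, pv_render_append, List.append_assoc]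

theorem pv_inv_keep (ps : List (List Char)) (i : Int) (s : List Char) (hs : ¬ (['\n','\n'] <:+: s)) :
    pvInv (ps ++ [pvStepPiece i s]) false := by
  refine ⟨by simp, ?_, ?_⟩
  · intro h; cases h
  · intro _
    rw [pv_render_append, pv_drop_long_append _ _ (pv_chunk_len i s)]
    intro heq
    exact pv_no_dots7 i s hs (heq ▸ List.drop_suffix _ _)

-- the canonical piece list A produces: eager "..." at the first dropped step of each run
def pvCanonS (n : Int) : Bool → List (Int × List Char) → List (List Char)
  | _, [] => []
  | b, p :: t =>
    if pvKeep n p.1 p.2 then pvStepPiece p.1 p.2 :: pvCanonS n false t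
    else if b then pvCanonS n true t
    else "...".toList :: pvCanonS n true t

-- A's fold renders exactly pvCanonS
theorem pv_loop_canon (n : Int) (l : List (Int × List Char))
    (hl : ∀ p ∈ l, ¬ (['\n','\n'] <:+: p.2)) :
    ∀ ps b, pvInv ps b →
    l.foldl (pvLoopA n) (pvRender ps) = pvRender (ps ++ pvCanonS n b l) := by
  induction l with
  | nil => intro ps b _; simp [pvCanonS]
  | cons hd tl ih =>
    intro ps b hinv
    obtain ⟨hne, hbt, hbf⟩ := hinv
    have hhd : ¬ (['\n','\n'] <:+: hd.2) := hl hd (by simp)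
    have htl : ∀ p ∈ tl, ¬ (['\n','\n'] <:+: p.2) := fun p hp => hl p (by simp [hp])
    simp only [List.foldl_cons]
    by_cases hk : pvKeep n hd.1 hd.2 = true
    · have hA : pvLoopA n (pvRender ps) hd = pvRender (ps ++ [pvStepPiece hd.1 hd.2]) := by
        rw [pv_render_append]; simp [pvLoopA, hk]
      rw [hA, ih htl _ false (pv_inv_keep ps hd.1 hd.2 hhd)]
      simp [pvCanonS, hk, List.append_assoc]
    · cases b with
      | true =>
        have hA : pvLoopA n (pvRender ps) hd = pvRender ps := by
          obtain ⟨t, ht⟩ := hbt rfl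
          have heq7 : (pvRender ps).drop ((pvRender ps).length - 7) = ['\n','\n','.','.','.','\n','\n'] := by
            rw [ht, pv_drop_long_append _ _ (by decide)]
            decide
          simp [pvLoopA, hk, pv_slice_neg7, heq7]
        rw [hA, ih htl ps true ⟨hne, hbt, hbf⟩]
        simp [pvCanonS, hk]
      | false =>
        have hA : pvLoopA n (pvRender ps) hd = pvRender (ps ++ ["...".toList]) := by
          rw [pv_render_append]
          have hne7 : ¬ (pvRender ps).drop ((pvRender ps).length - 7) = ['\n','\n','.','.','.','\n','\n'] := by
            simpa using hbf rfl
          simp [pvLoopA, hk, pv_slice_neg7, hne7]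
        have hinv' : pvInv (ps ++ ["...".toList]) true := by
          refine ⟨by simp, ?_, by intro h; cases h⟩
          intro _
          obtain ⟨t, ht⟩ := pv_render_ends_nl2 ps hne
          refine ⟨t, ?_⟩
          rw [pv_render_append, ht, List.append_assoc]
          congr 1
        rw [hA, ih htl _ true hinv']
        simp [pvCanonS, hk, List.append_assoc]

-- B's lazy gap pieces from the kept-index list
def pvGaps (steps : List (List Char)) : Int → List Int → List (List Char)
  | _, [] => []
  | j, k :: ks =>
    (if k - j > 1 then ["...".toList] else [])
      ++ pvStepPiece k ((PySem.List.pyGet? steps k).getD []) :: pvGaps steps k ks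

-- B's pair fold computes pvGaps
theorem pv_gapfold (steps : List (List Char)) :
    ∀ (ks : List Int) (j : Int) (acc : List (List Char)),
    ((j :: ks).zip ks).foldl (pvGapLoop steps) acc = acc ++ pvGaps steps j ks := by
  intro ks
  induction ks with
  | nil => intro j acc; simp [pvGaps]
  | cons k ks' ih =>
    intro j acc
    have hz : (j :: k :: ks').zip (k :: ks') = (j, k) :: (k :: ks').zip ks' := by
      simp [List.zip]
    rw [hz, List.foldl_cons, ih]
    simp only [pvGaps, pvGapLoop]
    split_ifs <;> simp [List.append_assoc]

-- eager pvCanonS over consecutive indices equals lazy pvGaps over the kept indices,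
-- provided the last index is kept (so no run of drops is pending at the end)
theorem pv_bridge (steps : List (List Char)) (n : Int) :
    ∀ (xs : List (List Char)) (k j : Int),
    j + 1 ≤ k →
    (xs = [] → j + 1 = k) →
    (∀ p ∈ PySem.List.enumerate xs k, PySem.List.pyGet? steps p.1 = some p.2) →
    (∀ s, xs.getLast? = some s → pvKeep n (k + xs.length - 1) s = true) →
    (if j + 1 < k then ["...".toList] else [])
        ++ pvCanonS n (decide (j + 1 < k)) (PySem.List.enumerate xs k)
      = pvGaps steps j (((PySem.List.enumerate xs k).filter
          (fun p => pvKeep n p.1 p.2)).map Prod.fst) := by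
  intro xs
  induction xs with
  | nil =>
    intro k j hle hnil _ _
    have hnlt : ¬ (j + 1 < k) := by have := hnil rfl; omega
    simp [PySem.List.enumerate_nil, pvCanonS, pvGaps, hnlt]
  | cons x t ih =>
    intro k j hle _ hget hlast
    rw [PySem.List.enumerate_cons]
    have hgetx : PySem.List.pyGet? steps k = some x := by
      have := hget (k, x) (by rw [PySem.List.enumerate_cons]; simp)
      simpa using this
    have hget' : ∀ p ∈ PySem.List.enumerate t (k + 1), PySem.List.pyGet? steps p.1 = some p.2 := by
      intro p hp
      exact hget p (by rw [PySem.List.enumerate_cons]; exact List.mem_cons_of_mem _ hp)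
    have hlast' : ∀ s, t.getLast? = some s → pvKeep n ((k + 1) + t.length - 1) s = true := by
      intro s hs
      cases t with
      | nil => cases hs
      | cons y u =>
        have h1 := hlast s (by rw [List.getLast?_cons_cons]; exact hs)
        have harith : (k + 1) + ((y :: u).length : Int) - 1 = k + ((x :: y :: u).length : Int) - 1 := by
          simp only [List.length_cons]; push_cast; ring
        rw [harith]
        exact h1
    by_cases hk : pvKeep n k x = true
    · have ihh := ih (k + 1) k (by omega) (fun _ => rfl) hget' hlast'
      have hnlt : ¬ (k + 1 < k + 1) := by omega
      rw [if_neg hnlt] at ihh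
      simp only [decide_eq_false hnlt, List.nil_append] at ihh
      simp only [List.filter_cons, hk, if_pos, List.map_cons, pvGaps, hgetx, Option.getD_some]
      have hgap : (k - j > 1) ↔ (j + 1 < k) := by omega
      by_cases hlt : j + 1 < k
      · rw [if_pos hlt, if_pos (hgap.mpr hlt)]
        simp only [decide_eq_true hlt]
        simp [pvCanonS, hk, ihh]
      · rw [if_neg hlt, if_neg (fun h => hlt (hgap.mp h))]
        simp only [decide_eq_false hlt]
        simp [pvCanonS, hk, ihh]
    · -- dropped step: t cannot be empty (the last element is kept)
      have ht : t ≠ [] := by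
        intro hte
        subst hte
        have h1 := hlast x (by simp)
        have harith : k + ([x].length : Int) - 1 = k := by
          simp only [List.length_cons, List.length_nil]; push_cast; ring
        rw [harith] at h1
        exact hk h1
      have ihh := ih (k + 1) j (by omega) (fun h => absurd h ht) hget' hlast'
      have hlt' : j + 1 < k + 1 := by omega
      rw [if_pos hlt'] at ihh
      simp only [decide_eq_true hlt'] at ihh
      have hkf : pvKeep n k x = false := by
        cases hkk : pvKeep n k x
        · rfl
        · exact absurd hkk hk
      simp only [List.filter_cons, hkf, Bool.false_eq_true, ite_false]
      rw [← ihh]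
      by_cases hlt : j + 1 < k
      · rw [if_pos hlt]
        simp only [decide_eq_true hlt]
        simp [pvCanonS, hkf]
      · rw [if_neg hlt]
        simp only [decide_eq_false hlt]
        simp [pvCanonS, hkf]

-- render vs join: p1\n\n…pk\n\n = ("\n\n".join pieces) ++ "\n\n"
theorem pv_render_eq_join (ps : List (List Char)) (h : ps ≠ []) :
    pvRender ps = PySem.Chars.join "\n\n".toList ps ++ "\n\n".toList := by
  induction ps with
  | nil => exact absurd rfl h
  | cons p tl ih =>
    cases tl with
    | nil => simp [pvRender, PySem.Chars.join_singleton]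
    | cons q r =>
      rw [PySem.Chars.join_cons_cons]
      have : pvRender (p :: q :: r) = (p ++ "\n\n".toList) ++ pvRender (q :: r) := by
        simp [pvRender]
      rw [this, ih (by simp)]
      simp

theorem pv_strip_nl2 (x : List Char) :
    PySem.Chars.stripChars (x ++ "\n\n".toList) "\n".toList = PySem.Chars.stripChars x "\n".toList := by
  unfold PySem.Chars.stripChars
  dsimp only
  set p := fun c : Char => (("\n".toList).contains c) with hp
  have hnl : p '\n' = true := by rw [hp]; decide
  rw [List.dropWhile_append]
  by_cases h : (List.dropWhile p x).isEmpty
  · rw [if_pos h]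
    have h2 : List.dropWhile p ("\n\n".toList) = [] := by rw [hp]; decide
    rw [List.isEmpty_iff] at h
    rw [h2, h]
  · rw [if_neg h, List.reverse_append]
    have h3 : ("\n\n".toList).reverse = '\n' :: '\n' :: [] := by decide
    rw [h3]
    simp only [List.cons_append, List.nil_append]
    rw [List.dropWhile_cons_of_pos hnl, List.dropWhile_cons_of_pos hnl]

-- ===== VERDICT (by name: the statement is the Claim_ definition above) =====
theorem truncate_reasoning_str_spec : Claim_equal_truncate_reasoning_str := by
  intro reasoning_str _
  unfold Spec_truncate_reasoning_str truncate_reasoning_str truncate_reasoning_str_alt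
  have hsplit2 : ∀ (u : List Char), (PySem.Chars.split? u "\n\n".toList).getD []
      = PySem.Chars.splitOn u "\n\n".toList := by
    intro u
    rw [PySem.Chars.split?, if_neg (by decide)]
    rfl
  simp only [hsplit2]
  generalize PySem.List.pyGetD ((PySem.Chars.split? reasoning_str.toList "<think>".toList).getD []) (-1) [] = rs
  generalize hST : PySem.Chars.splitOn rs "\n\n".toList = steps
  have hne : steps ≠ [] := hST ▸ pv_splitOn_ne_nil rs _
  have hpieces : ∀ p ∈ steps, ¬ (['\n','\n'] <:+: p) := by
    have hlit : ("\n\n".toList : List Char) = ['\n','\n'] := by decide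
    intro p hp
    rw [← hST] at hp
    exact hlit ▸ pv_splitOn_pieces rs "\n\n".toList (by decide) p hp
  obtain ⟨s0, rest, rfl⟩ := List.exists_cons_of_ne_nil hne
  set n : Int := ((s0 :: rest).length : Int) with hn
  -- A side: peel step 0 (always kept), then pv_loop_canon
  have hl : ∀ p ∈ PySem.List.enumerate rest 1, ¬ (['\n','\n'] <:+: p.2) := by
    intro p hp
    rw [PySem.List.mem_enumerate_iff] at hp
    obtain ⟨m, hm, rfl⟩ := hp
    exact hpieces _ (List.mem_cons_of_mem _ (rest.getElem_mem hm))
  have hs0 : ¬ (['\n','\n'] <:+: s0) := hpieces s0 (by simp)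
  have hk0 : pvKeep n 0 s0 = true := by simp [pvKeep]
  rw [PySem.List.enumerate_cons, List.foldl_cons]
  have hA0 : pvLoopA n [] (0, s0) = pvRender [pvStepPiece 0 s0] := by
    simp [pvLoopA, hk0, pvRender]
  have hinv0 : pvInv [pvStepPiece 0 s0] false := by
    refine ⟨by simp, ?_, ?_⟩
    · intro h; cases h
    · intro _
      have hr : pvRender [pvStepPiece 0 s0] = pvStepPiece 0 s0 ++ "\n\n".toList := by
        simp [pvRender]
      rw [hr]
      intro heq
      exact pv_no_dots7 0 s0 hs0 (heq ▸ List.drop_suffix _ _)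
  rw [show (0 : Int) + 1 = (1 : Int) by norm_num]
  rw [hA0, pv_loop_canon n (PySem.List.enumerate rest (1 : Int)) hl [pvStepPiece 0 s0] false hinv0]
  -- B side: the kept list starts with 0, then gapfold + bridge
  have hkept : (((0, s0) :: PySem.List.enumerate rest (1 : Int)).filter (fun p => pvKeep n p.1 p.2)).map Prod.fst
      = 0 :: ((PySem.List.enumerate rest (1 : Int)).filter (fun p => pvKeep n p.1 p.2)).map Prod.fst := by
    rw [List.filter_cons]
    simp [hk0]
  rw [hkept]
  set ks := ((PySem.List.enumerate rest (1 : Int)).filter (fun p => pvKeep n p.1 p.2)).map Prod.fst with hks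
  have hfirst : (PySem.List.pyGet? (0 :: ks) (0 : Int)).getD 0 = (0 : Int) := by
    simp [PySem.List.pyGet?, PySem.List.pyIdx?]
  rw [hfirst]
  have hget0 : (PySem.List.pyGet? (s0 :: rest) (0 : Int)).getD [] = s0 := by
    simp [PySem.List.pyGet?, PySem.List.pyIdx?]
  rw [hget0]
  rw [PySem.List.slice_from_one]
  have hgf := pv_gapfold (s0 :: rest) ks 0 [pvStepPiece 0 s0]
  simp only [List.tail_cons]
  rw [hgf]
  -- bridge: canonS over the tail equals the gap pieces over its kept indices
  have hbr := pv_bridge (s0 :: rest) n rest 1 0 (by norm_num) (by intro h; subst h; norm_num)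
    (by
      intro p hp
      rw [PySem.List.mem_enumerate_iff] at hp
      obtain ⟨m, hm, rfl⟩ := hp
      have hc : (1 : Int) + (m : Int) = (((m + 1 : Nat)) : Int) := by push_cast; ring
      rw [hc, PySem.List.pyGet?_natCast]
      simp [hm])
    (by
      intro s hs
      have hrne : rest ≠ [] := by intro h; subst h; cases hs
      have harith : (1 : Int) + (rest.length : Int) - 1 = (rest.length : Int) := by ring
      rw [harith]
      have hd : (n - 5 ≤ (rest.length : Int)) := by
        rw [hn]; simp only [List.length_cons]; push_cast; omega
      simp [pvKeep, hd])
  have hnotlt : ¬ ((0 : Int) + 1 < (1 : Int)) := by norm_num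
  rw [if_neg hnotlt] at hbr
  simp only [decide_eq_false hnotlt, List.nil_append] at hbr
  rw [← hks] at hbr
  rw [← hbr]
  -- both sides are now render/join of the same piece list
  have hfin : ([pvStepPiece 0 s0] ++ pvCanonS n false (PySem.List.enumerate rest (1 : Int))) ≠ [] := by simp
  rw [pv_render_eq_join _ hfin, pv_strip_nl2]
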